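-- pv_equiv track=rewrite | github.com/nfarnan/cs001X_examples | recursion/MW/06_odd_subset.py | odd_subset
-- ===== SOURCE A (Python) =====
-- def odd_subset(a_list):
-- 	if len(a_list) == 0:
-- 		return []
-- 	else:
-- 		odds = odd_subset(a_list[1:])
-- 		if a_list[0] % 2 != 0:
-- 			odds.append(a_list[0])
--
-- 		return odds
-- ===== SOURCE B (Python) =====
-- def odd_subset(a_list):
--     result = []
--     for x in a_list:
--         if x % 2 != 0:
--             result.insert(0, x)
--     return result
-- ===== Notes on version B (the rewrite author's own statement) =====
-- stated objective: simpler
-- what changed: Replaced the recursion-on-tail with slicing and append by a single iterative pass that prepends each odd element to an accumulator, so no recursion and no list slicing.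
import Mathlib
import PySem

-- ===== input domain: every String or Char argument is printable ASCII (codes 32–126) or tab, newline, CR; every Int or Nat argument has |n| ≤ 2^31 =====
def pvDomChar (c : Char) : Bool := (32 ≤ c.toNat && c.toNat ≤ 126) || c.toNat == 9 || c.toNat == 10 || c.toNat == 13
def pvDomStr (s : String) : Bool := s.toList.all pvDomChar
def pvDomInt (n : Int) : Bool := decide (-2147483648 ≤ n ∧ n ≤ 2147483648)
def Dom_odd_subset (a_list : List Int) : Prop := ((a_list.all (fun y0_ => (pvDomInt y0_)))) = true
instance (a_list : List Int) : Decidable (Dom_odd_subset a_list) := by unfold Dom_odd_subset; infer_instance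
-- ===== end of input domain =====

-- B replaces the slice-and-append recursion with one iterative pass prepending odds to an accumulator (objective: simpler).

-- ===== PORT A =====
def odd_subset (a_list : List Int) : List Int :=
  match a_list with
  | [] => []
  | x :: rest =>
    let odds := odd_subset rest
    if PySem.Int.mod x 2 ≠ 0 then odds ++ [x] else odds

-- ===== PORT B =====
def odd_subset_alt (a_list : List Int) : List Int :=
  a_list.foldl (fun result x => if PySem.Int.mod x 2 ≠ 0 then x :: result else result) []

-- ===== PRECONDITION & SPEC =====
def Spec_odd_subset (a_list : List Int) (out : List Int) : Prop := out = odd_subset_alt a_list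
instance (a_list : List Int) (out : List Int) : Decidable (Spec_odd_subset a_list out) := by unfold Spec_odd_subset; infer_instance

-- ===== CLAIM (what is proved, stated in full; the proofs are below) =====
def Claim_equal_odd_subset : Prop := ∀ (a_list : List Int), Dom_odd_subset a_list → Spec_odd_subset a_list (odd_subset a_list)

-- ===== LEMMAS AND PROOFS =====
theorem odd_subset_foldl (l : List Int) (acc : List Int) :
    l.foldl (fun result x => if PySem.Int.mod x 2 ≠ 0 then x :: result else result) acc
      = odd_subset l ++ acc := by
  induction l generalizing acc with
  | nil => simp [odd_subset]
  | cons x rest ih =>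
    simp only [List.foldl_cons, ih, odd_subset]
    split_ifs <;> simp

-- ===== VERDICT (by name: the statement is the Claim_ definition above) =====
theorem odd_subset_spec : Claim_equal_odd_subset := by
  intro l _
  unfold Spec_odd_subset odd_subset_alt
  rw [odd_subset_foldl, List.append_nil]
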